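-- pv_equiv track=rewrite | github.com/distributed-systems-co/lida-multiagents-research | src/meta/locality.py | _get_nearby_cells
-- ===== SOURCE A (Python) =====
-- from typing import Any, Callable, Dict, List, Optional, Set, Tuple, Union
--
-- def _get_nearby_cells(cell: Tuple[int, ...]) -> List[Tuple[int, ...]]:
--     """Get cells within communication range."""
--     # For 2D, check 3x3 grid around cell
--     offsets = [-1, 0, 1]
--     cells = []
--
--     from itertools import product
--     for offset in product(*[offsets] * len(cell)):
--         nearby = tuple(c + o for c, o in zip(cell, offset))
--         cells.append(nearby)
--
--     return cells
-- ===== SOURCE B (Python) =====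
-- def _get_nearby_cells(cell):
--     """Get cells within communication range."""
--     # Counter-based enumeration: decode each index k in [0, 3**d) as a
--     # base-3 number whose digits (minus 1) are the per-coordinate offsets,
--     # rightmost coordinate = least significant digit.
--     d = len(cell)
--     cells = []
--     for k in range(3 ** d):
--         digits = []
--         x = k
--         for c in reversed(cell):
--             digits.append(c + x % 3 - 1)
--             x //= 3
--         digits.reverse()
--         cells.append(tuple(digits))
--     return cells
-- ===== Notes on version B (the rewrite author's own statement) =====
-- stated objective: alternative
-- what changed: Replaces itertools.product over d copies of the offset list (plus zip/tuple reconstruction) with arithmetic decoding of a single counter: each index k in range(3**d) is decoded as a base-3 number via repeated %3 and //=3, each digit minus 1 being the offset for the corresponding coordinate (rightmost = least significant).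
import Mathlib
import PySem

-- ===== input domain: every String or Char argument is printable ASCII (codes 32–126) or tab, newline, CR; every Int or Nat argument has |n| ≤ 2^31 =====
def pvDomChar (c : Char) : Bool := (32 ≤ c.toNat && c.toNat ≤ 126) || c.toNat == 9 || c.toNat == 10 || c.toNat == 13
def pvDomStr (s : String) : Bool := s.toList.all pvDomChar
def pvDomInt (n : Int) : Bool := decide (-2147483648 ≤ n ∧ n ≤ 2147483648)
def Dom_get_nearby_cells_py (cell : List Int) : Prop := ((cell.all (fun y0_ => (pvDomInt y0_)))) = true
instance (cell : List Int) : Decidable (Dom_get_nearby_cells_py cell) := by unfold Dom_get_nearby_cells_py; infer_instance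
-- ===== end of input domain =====

-- B replaces itertools.product + zip with base-3 arithmetic decoding of a counter k in range(3**d) (objective: alternative).
-- ===== PORT A =====
-- product(*[offsets]*n): lexicographic tuples, rightmost fastest
def pvProdRep (offsets : List Int) : Nat → List (List Int)
  | 0 => [[]]
  | n + 1 => offsets.flatMap (fun o => (pvProdRep offsets n).map (fun rest => o :: rest))

def get_nearby_cells_py (cell : List Int) : List (List Int) :=
  let offsets : List Int := [-1, 0, 1]
  let cells : List (List Int) := []
  (pvProdRep offsets cell.length).foldl
    (fun cells offset =>
      let nearby := List.zipWith (fun c o => c + o) cell offset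
      cells ++ [nearby]) cells

-- ===== PORT B =====
def get_nearby_cells_py_alt (cell : List Int) : List (List Int) :=
  let d := cell.length
  (PySem.List.pyRange 0 ((3 : Int) ^ d) 1).foldl
    (fun cells k =>
      -- digits = []; x = k; for c in reversed(cell): digits.append(c + x % 3 - 1); x //= 3
      let st := cell.reverse.foldl
        (fun (st : List Int × Int) c =>
          (st.1 ++ [c + PySem.Int.mod st.2 3 - 1], PySem.Int.floordiv st.2 3))
        ([], k)
      -- digits.reverse(); cells.append(tuple(digits))
      cells ++ [st.1.reverse]) []

-- ===== PRECONDITION & SPEC =====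
def Spec_get_nearby_cells_py (cell : List Int) (out : List (List Int)) : Prop := out = get_nearby_cells_py_alt cell
instance (cell : List Int) (out : List (List Int)) : Decidable (Spec_get_nearby_cells_py cell out) := by unfold Spec_get_nearby_cells_py; infer_instance

-- ===== CLAIM (what is proved, stated in full; the proofs are below) =====
def Claim_equal_get_nearby_cells_py : Prop := ∀ (cell : List Int), Dom_get_nearby_cells_py cell → Spec_get_nearby_cells_py cell (get_nearby_cells_py cell)

-- ===== LEMMAS AND PROOFS =====

-- common recursive characterisation: neighbour tuples, rightmost coordinate fastest
def pvNbr : List Int → List (List Int)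
  | [] => [[]]
  | c :: cs => ([-1, 0, 1] : List Int).flatMap (fun o => (pvNbr cs).map (fun r => (c + o) :: r))

theorem pv_foldl_append_map {α β : Type} (f : α → β) :
    ∀ (l : List α) (acc : List β),
      l.foldl (fun cells x => cells ++ [f x]) acc = acc ++ l.map f := by
  intro l
  induction l with
  | nil => intro acc; simp
  | cons x xs ih => intro acc; simp [ih]

theorem pvA_eq_nbr (cell : List Int) : get_nearby_cells_py cell = pvNbr cell := by
  unfold get_nearby_cells_py
  rw [pv_foldl_append_map]
  simp only [List.nil_append]
  induction cell with
  | nil => simp [pvProdRep, pvNbr]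
  | cons c cs ih =>
    simp only [List.length_cons, pvProdRep, pvNbr, List.map_flatMap, List.map_map]
    refine List.flatMap_congr (fun o _ => ?_)
    rw [← ih, List.map_map]
    rfl

-- the inner digit loop, as recursion over the (reversed) cell with Int arithmetic
def pvGo : List Int → Int → List Int
  | [], _ => []
  | c :: cs, x => (c + PySem.Int.mod x 3 - 1) :: pvGo cs (PySem.Int.floordiv x 3)

theorem pv_inner_foldl (l : List Int) :
    ∀ (acc : List Int) (x : Int),
      (l.foldl
        (fun (st : List Int × Int) c =>
          (st.1 ++ [c + PySem.Int.mod st.2 3 - 1], PySem.Int.floordiv st.2 3))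
        (acc, x)).1 = acc ++ pvGo l x := by
  induction l with
  | nil => intro acc x; simp [pvGo]
  | cons c cs ih =>
    intro acc x
    rw [List.foldl_cons, ih]
    simp [pvGo]

-- Nat version of the digit loop
def pvGoN : List Int → Nat → List Int
  | [], _ => []
  | c :: cs, k => (c + (k % 3 : Nat) - 1) :: pvGoN cs (k / 3)

theorem pvGo_natCast : ∀ (l : List Int) (k : Nat), pvGo l (k : Int) = pvGoN l k := by
  intro l
  induction l with
  | nil => intro k; rfl
  | cons c cs ih =>
    intro k
    have hm : PySem.Int.mod (k : Int) 3 = ((k % 3 : Nat) : Int) :=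
      by exact_mod_cast PySem.Int.mod_natCast k 3
    have hd : PySem.Int.floordiv (k : Int) 3 = ((k / 3 : Nat) : Int) :=
      by exact_mod_cast PySem.Int.floordiv_natCast k 3
    simp only [pvGo, pvGoN]
    rw [hm, hd, ih]

theorem pvGoN_append_last (c : Int) :
    ∀ (l : List Int) (k : Nat),
      pvGoN (l ++ [c]) k = pvGoN l k ++ [c + (k / 3 ^ l.length % 3 : Nat) - 1] := by
  intro l
  induction l with
  | nil => intro k; simp [pvGoN]
  | cons a l ih =>
    intro k
    simp only [List.cons_append, pvGoN, ih, List.length_cons]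
    rw [Nat.div_div_eq_div_mul, ← pow_succ']

theorem pvGoN_low_digits :
    ∀ (l : List Int) (j r : Nat), r < 3 ^ l.length →
      pvGoN l (j * 3 ^ l.length + r) = pvGoN l r := by
  intro l
  induction l with
  | nil => intro j r h; rfl
  | cons a l ih =>
    intro j r h
    simp only [List.length_cons] at h ⊢
    have h3 : (3:Nat) ^ (l.length + 1) = 3 ^ l.length * 3 := by ring
    have hmod : (j * 3 ^ (l.length + 1) + r) % 3 = r % 3 := by
      rw [h3, ← mul_assoc, Nat.add_comm, Nat.add_mul_mod_self_right]
    have hdiv : (j * 3 ^ (l.length + 1) + r) / 3 = j * 3 ^ l.length + r / 3 := by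
      rw [h3]
      have e : j * (3 ^ l.length * 3) + r = r + 3 * (j * 3 ^ l.length) := by ring
      rw [e, Nat.add_mul_div_left _ _ (by norm_num : 0 < 3), Nat.add_comm]
    have hr3 : r / 3 < 3 ^ l.length := by
      rw [Nat.div_lt_iff_lt_mul (by norm_num), ← h3]; exact h
    simp only [pvGoN, hmod, hdiv, ih j (r / 3) hr3]

-- pvNbr ordered list = the base-3 decode of successive counters
theorem pv_nbr_eq_decode :
    ∀ (cell : List Int),
      pvNbr cell = (List.range (3 ^ cell.length)).map (fun k => (pvGoN cell.reverse k).reverse) := by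
  intro cell
  induction cell with
  | nil => simp [pvNbr, pvGoN]
  | cons c cs ih =>
    have hlen : cs.reverse.length = cs.length := by simp
    have hdec : ∀ j : Nat, j < 3 → ∀ r ∈ List.range (3 ^ cs.length),
        (pvGoN (c :: cs).reverse (j * 3 ^ cs.length + r)).reverse
        = (c + (j : Int) - 1) :: (pvGoN cs.reverse r).reverse := by
      intro j hj r hr
      rw [List.mem_range] at hr
      have hjd : (j * 3 ^ cs.length + r) / 3 ^ cs.length = j := by
        have e : j * 3 ^ cs.length + r = r + 3 ^ cs.length * j := by ring
        rw [e, Nat.add_mul_div_left _ _ (by positivity), Nat.div_eq_of_lt hr, Nat.zero_add]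
      have hlow := pvGoN_low_digits cs.reverse j r (by rw [hlen]; exact hr)
      rw [hlen] at hlow
      rw [List.reverse_cons, pvGoN_append_last, hlen, hjd, Nat.mod_eq_of_lt hj, hlow]
      simp
    have hsplit : List.range (3 ^ (c :: cs).length)
        = List.range (3 ^ cs.length)
          ++ ((List.range (3 ^ cs.length)).map (fun r => 3 ^ cs.length + r)
          ++ (List.range (3 ^ cs.length)).map (fun r => 2 * 3 ^ cs.length + r)) := by
      have h1 : (3:Nat) ^ (c :: cs).length = 3 ^ cs.length + (3 ^ cs.length + 3 ^ cs.length) := by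
        simp only [List.length_cons]; ring
      rw [h1, List.range_add, List.range_add, List.map_append, List.map_map]
      congr 1
      congr 1
      apply List.map_congr_left; intro r _; simp; omega
    rw [hsplit]
    simp only [List.map_append, List.map_map, pvNbr, List.flatMap_cons, List.flatMap_nil,
      List.append_nil, ih]
    congr 1
    · apply List.map_congr_left
      intro r hr
      have h := hdec 0 (by norm_num) r hr
      simp only [Nat.zero_mul, Nat.zero_add] at h
      rw [h]; norm_num; ring
    congr 1
    · apply List.map_congr_left
      intro r hr
      have h := hdec 1 (by norm_num) r hr
      rw [Nat.one_mul] at h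
      simp only [Function.comp_apply]
      rw [h]; norm_num
    · apply List.map_congr_left
      intro r hr
      have h := hdec 2 (by norm_num) r hr
      simp only [Function.comp_apply]
      rw [h]; norm_num; ring

theorem pvB_eq_nbr (cell : List Int) : get_nearby_cells_py_alt cell = pvNbr cell := by
  unfold get_nearby_cells_py_alt
  rw [pv_foldl_append_map (fun k =>
      ((cell.reverse.foldl
        (fun (st : List Int × Int) c =>
          (st.1 ++ [c + PySem.Int.mod st.2 3 - 1], PySem.Int.floordiv st.2 3))
        ([], k)).1).reverse)]
  simp only [List.nil_append]
  have hpow : ((3 : Int) ^ cell.length) = ((3 ^ cell.length : Nat) : Int) := by push_cast; ring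
  rw [hpow, PySem.List.pyRange_zero_nat, List.map_map, pv_nbr_eq_decode]
  apply List.map_congr_left
  intro k _
  rw [Function.comp_apply, pv_inner_foldl, List.nil_append, pvGo_natCast]

-- ===== VERDICT (by name: the statement is the Claim_ definition above) =====
theorem get_nearby_cells_py_spec : Claim_equal_get_nearby_cells_py := by
  intro cell _
  unfold Spec_get_nearby_cells_py
  rw [pvA_eq_nbr, pvB_eq_nbr]
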